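-- pv_equiv track=rewrite | github.com/ekbfjefbfb/ESTUDENTE | routers/chat_search.py | prioritize_sources_with_images
-- ===== SOURCE A (Python) =====
-- from typing import Dict, Any, List
--
-- def prioritize_sources_with_images(sources: List[Dict[str, Any]], max_sources: int = 5) -> List[Dict[str, Any]]:
--     """Prioriza fuentes con imágenes"""
--     if not sources:
--         return []
--
--     prioritized = []
--     remainder = []
--
--     for s in sources:
--         if not isinstance(s, dict):
--             continue
--         if str(s.get("image") or s.get("image_url") or "").strip():
--             prioritized.append(s)
--         else:
--             remainder.append(s)
--
--     return (prioritized + remainder)[:max_sources]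
-- ===== SOURCE B (Python) =====
-- from typing import Dict, Any, List
--
-- def prioritize_sources_with_images(sources: List[Dict[str, Any]], max_sources: int = 5) -> List[Dict[str, Any]]:
--     """Prioriza fuentes con imagenes"""
--     dicts = [s for s in sources if isinstance(s, dict)]
--     return sorted(
--         dicts,
--         key=lambda s: not str(s.get("image") or s.get("image_url") or "").strip(),
--     )[:max_sources]
-- ===== Notes on version B (the rewrite author's own statement) =====
-- stated objective: simpler
-- what changed: A's one-pass manual partition into prioritized/remainder lists is replaced by a single stable sort on the boolean key 'has no image' (stability preserves the relative order inside each group), followed by the same slice.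
import Mathlib
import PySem

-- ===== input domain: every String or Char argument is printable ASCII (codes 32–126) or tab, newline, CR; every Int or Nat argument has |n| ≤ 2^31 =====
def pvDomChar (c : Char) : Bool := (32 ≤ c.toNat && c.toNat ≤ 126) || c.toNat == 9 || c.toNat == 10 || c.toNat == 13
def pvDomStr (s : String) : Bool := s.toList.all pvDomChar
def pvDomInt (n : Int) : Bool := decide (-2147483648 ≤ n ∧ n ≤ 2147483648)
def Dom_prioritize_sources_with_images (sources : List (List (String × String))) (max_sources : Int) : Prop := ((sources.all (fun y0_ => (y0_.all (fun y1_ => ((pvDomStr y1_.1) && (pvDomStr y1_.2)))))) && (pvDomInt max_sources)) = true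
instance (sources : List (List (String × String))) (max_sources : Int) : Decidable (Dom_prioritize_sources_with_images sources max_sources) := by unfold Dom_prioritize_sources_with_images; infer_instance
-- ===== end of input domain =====

-- B replaces A's one-pass two-accumulator partition by a stable sort on a boolean
-- "has no image" key followed by the same slice (objective: simpler/idiomatic;
-- same observable behaviour, no mutation involved).

-- Shared truthiness predicate: str(s.get("image") or s.get("image_url") or "").strip()
-- is truthy.  `x or y` on a possibly-missing string value: first non-empty value wins.
def pvOrStr (o : Option String) (b : String) : String :=
  match o with
  | some v => if v = "" then b else v
  | none => b

def pvHasImg (s : List (String × String)) : Bool :=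
  let d : PySem.Dict String String := PySem.Dict.mk s
  !(PySem.Str.strip (pvOrStr (d.get? "image") (pvOrStr (d.get? "image_url") "")) = "")

-- ===== PORT A =====
-- literal port of A: the `isinstance(s, dict)` guard is always true under the type
-- convention (every element IS a dict), so the `continue` branch cannot fire.
def prioritize_sources_with_images (sources : List (List (String × String))) (max_sources : Int) : List (List (String × String)) :=
  if sources = [] then []
  else
    let pr := sources.foldl
      (fun (acc : List (List (String × String)) × List (List (String × String))) s =>
        if pvHasImg s then (acc.1 ++ [s], acc.2) else (acc.1, acc.2 ++ [s]))
      ([], [])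
    PySem.List.slice (pr.1 ++ pr.2) none (some max_sources)

-- ===== PORT B =====
-- literal port of Source B: the isinstance filter keeps everything under the type
-- convention, then a stable sort on the boolean key `not has-image`, then the slice.
def prioritize_sources_with_images_alt (sources : List (List (String × String))) (max_sources : Int) : List (List (String × String)) :=
  PySem.List.slice (PySem.List.sorted sources (fun s => !pvHasImg s) false) none (some max_sources)

-- ===== PRECONDITION & SPEC =====
def Spec_prioritize_sources_with_images (sources : List (List (String × String))) (max_sources : Int) (out : List (List (String × String))) : Prop := out = prioritize_sources_with_images_alt sources max_sources
instance (sources : List (List (String × String))) (max_sources : Int) (out : List (List (String × String))) : Decidable (Spec_prioritize_sources_with_images sources max_sources out) := by unfold Spec_prioritize_sources_with_images; infer_instance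

-- ===== CLAIM (what is proved, stated in full; the proofs are below) =====
def Claim_equal_prioritize_sources_with_images : Prop := ∀ (sources : List (List (String × String))) (max_sources : Int), Dom_prioritize_sources_with_images sources max_sources → Spec_prioritize_sources_with_images sources max_sources (prioritize_sources_with_images sources max_sources)

-- ===== LEMMAS AND PROOFS =====

-- Inserting an element whose key is `false` into `A ++ B` (all of A keyed `false`,
-- all of B keyed `true`) puts it between A and B.
theorem pv_insertBy_mid {α : Type} (key : α → Bool) (x : α) (A B : List α)
    (hA : ∀ a ∈ A, key a = false) (hB : ∀ b ∈ B, key b = true) (hx : key x = false) :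
    PySem.List.insertBy (fun a b => decide (key a < key b)) x (A ++ B) = A ++ x :: B := by
  induction A with
  | nil =>
    cases B with
    | nil => simp [PySem.List.insertBy]
    | cons b bs =>
      have hb := hB b (by simp)
      simp [PySem.List.insertBy, hx, hb]
  | cons a as ih =>
    have ha := hA a (by simp)
    simp only [List.cons_append, PySem.List.insertBy, hx, ha]
    simp [ih (fun a h => hA a (by simp [h]))]

-- Inserting an element whose key is `true` goes to the very end (never strictly above `true`).
theorem pv_insertBy_last {α : Type} (key : α → Bool) (x : α) (L : List α)
    (hx : key x = true) :
    PySem.List.insertBy (fun a b => decide (key a < key b)) x L = L ++ [x] := by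
  apply PySem.List.insertBy_of_forall_not_before
  intro y _
  simp [hx]

-- The insertion-sort loop over a boolean key keeps the partition shape.
theorem pv_sort_loop (key : List (String × String) → Bool)
    (l A B : List (List (String × String)))
    (hA : ∀ a ∈ A, key a = false) (hB : ∀ b ∈ B, key b = true) :
    l.foldl (fun acc x => PySem.List.insertBy (fun a b => decide (key a < key b)) x acc) (A ++ B)
      = (A ++ l.filter (fun s => !key s)) ++ (B ++ l.filter (fun s => key s)) := by
  induction l generalizing A B with
  | nil => simp
  | cons x xs ih =>
    by_cases hx : key x = true
    · have h1 : PySem.List.insertBy (fun a b => decide (key a < key b)) x (A ++ B)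
          = A ++ (B ++ [x]) := by
        rw [← List.append_assoc]
        exact pv_insertBy_last key x (A ++ B) hx
      simp only [List.foldl_cons, h1]
      rw [ih A (B ++ [x]) hA (by intro b hb; rcases List.mem_append.1 hb with h | h
                                 · exact hB b h
                                 · rw [List.mem_singleton.1 h]; exact hx)]
      simp [hx]
    · have hx' : key x = false := by simpa using hx
      have h1 := pv_insertBy_mid key x A B hA hB hx'
      simp only [List.foldl_cons, h1]
      have : A ++ x :: B = (A ++ [x]) ++ B := by simp
      rw [this, ih (A ++ [x]) B (by intro a ha; rcases List.mem_append.1 ha with h | h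
                                    · exact hA a h
                                    · rw [List.mem_singleton.1 h]; exact hx') hB]
      simp [hx']

-- A's partition loop appends the filtered halves.
theorem pv_partition_loop (l p r : List (List (String × String))) :
    l.foldl
      (fun (acc : List (List (String × String)) × List (List (String × String))) s =>
        if pvHasImg s then (acc.1 ++ [s], acc.2) else (acc.1, acc.2 ++ [s]))
      (p, r)
      = (p ++ l.filter (fun s => pvHasImg s), r ++ l.filter (fun s => !pvHasImg s)) := by
  induction l generalizing p r with
  | nil => simp
  | cons x xs ih =>
    by_cases hx : pvHasImg x = true
    · simp [List.foldl_cons, hx, ih]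
    · simp [List.foldl_cons, hx, ih]

-- B's sorted list IS A's prioritized ++ remainder.
theorem pv_sorted_eq_partition (sources : List (List (String × String))) :
    PySem.List.sorted sources (fun s => !pvHasImg s) false
      = sources.filter (fun s => pvHasImg s) ++ sources.filter (fun s => !pvHasImg s) := by
  rw [PySem.List.sorted_eq_foldl_insertBy]
  have := pv_sort_loop (fun s => !pvHasImg s) sources [] [] (by simp) (by simp)
  simpa using this

-- ===== VERDICT (by name: the statement is the Claim_ definition above) =====
theorem prioritize_sources_with_images_spec : Claim_equal_prioritize_sources_with_images := by
  intro sources max_sources _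
  unfold Spec_prioritize_sources_with_images prioritize_sources_with_images
    prioritize_sources_with_images_alt
  by_cases h : sources = []
  · subst h; simp [PySem.List.sorted, PySem.List.slice]
  · simp only [h, pv_partition_loop, pv_sorted_eq_partition]
    simp
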